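-- pv_equiv track=rewrite | github.com/byee4/yeolab-kb | yeolab_search/publications/services.py | _merge_control_relations
-- ===== SOURCE A (Python) =====
-- def _merge_control_relations(existing_relations, controls):
--     """Merge `control:ENCSR...` tags into existing relations list."""
--     merged = list(existing_relations or [])
--     seen = set(merged)
--     for control_acc in controls:
--         relation = f"control:{control_acc}"
--         if relation not in seen:
--             merged.append(relation)
--             seen.add(relation)
--     return merged
-- ===== SOURCE B (Python) =====
-- def _merge_control_relations(existing_relations, controls):
--     """Merge `control:ENCSR...` tags into existing relations list."""
--     merged = list(existing_relations or [])
--     fresh = []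
--     pending = list(controls)
--     while pending:
--         head = pending[0]
--         pending = [c for c in pending[1:] if c != head]
--         tag = "control:" + head
--         if tag not in merged:
--             fresh.append(tag)
--     return merged + fresh
-- ===== Notes on version B (the rewrite author's own statement) =====
-- stated objective: alternative
-- what changed: Replaces A's grow-a-seen-set single pass by a sieve-style worklist: repeatedly take the first pending control, delete all its later duplicates from the worklist by filtering, and keep its tag unless it already occurs in the fixed existing list (plain list membership, no auxiliary set and no growing membership structure).
import Mathlib
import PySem

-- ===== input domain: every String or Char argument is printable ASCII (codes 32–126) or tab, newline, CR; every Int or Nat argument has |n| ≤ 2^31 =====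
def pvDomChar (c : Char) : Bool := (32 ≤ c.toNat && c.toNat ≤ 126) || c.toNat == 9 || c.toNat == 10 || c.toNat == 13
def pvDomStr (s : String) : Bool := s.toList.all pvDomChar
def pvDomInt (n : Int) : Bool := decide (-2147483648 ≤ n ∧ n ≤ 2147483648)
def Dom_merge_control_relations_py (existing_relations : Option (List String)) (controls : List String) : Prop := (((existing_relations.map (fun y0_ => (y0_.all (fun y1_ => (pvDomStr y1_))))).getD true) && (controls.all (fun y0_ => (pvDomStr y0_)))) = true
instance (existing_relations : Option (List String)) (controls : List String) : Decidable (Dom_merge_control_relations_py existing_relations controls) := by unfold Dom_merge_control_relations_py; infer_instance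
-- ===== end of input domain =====

-- B replaces A's grow-a-seen-set pass by a sieve-style worklist: take the first pending control, filter its later duplicates out of the worklist, keep its tag unless it is already in the fixed existing list.

-- ===== PORT A =====
def merge_control_relations_py (existing_relations : Option (List String)) (controls : List String) : List String :=
  let merged := existing_relations.getD []           -- `existing_relations or []`
  let seen : PySem.Set String := PySem.Set.ofList merged
  (controls.foldl (fun (st : List String × PySem.Set String) control_acc =>
      let relation := "control:" ++ control_acc
      if PySem.Set.contains st.2 relation then st
      else (st.1 ++ [relation], PySem.Set.add st.2 relation)) (merged, seen)).1

-- ===== PORT B =====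
-- the `while pending:` worklist loop (recursion on the shrinking worklist)
def freshLoop (merged : List String) : List String → List String → List String
  | [], fresh => fresh
  | head :: rest, fresh =>
    let pending := rest.filter (fun c => !(c == head))     -- [c for c in pending[1:] if c != head]
    let tag := "control:" ++ head
    freshLoop merged pending (if tag ∈ merged then fresh else fresh ++ [tag])
termination_by pending _ => pending.length
decreasing_by simpa using Nat.lt_succ_of_le (le_trans (List.length_filter_le _ _) (by simp))

def merge_control_relations_py_alt (existing_relations : Option (List String)) (controls : List String) : List String :=
  let merged := existing_relations.getD []           -- `existing_relations or []`
  merged ++ freshLoop merged controls []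

-- ===== PRECONDITION & SPEC =====
def Spec_merge_control_relations_py (existing_relations : Option (List String)) (controls : List String) (out : List String) : Prop := out = merge_control_relations_py_alt existing_relations controls
instance (existing_relations : Option (List String)) (controls : List String) (out : List String) : Decidable (Spec_merge_control_relations_py existing_relations controls out) := by unfold Spec_merge_control_relations_py; infer_instance

-- ===== CLAIM (what is proved, stated in full; the proofs are below) =====
def Claim_equal_merge_control_relations_py : Prop := ∀ (existing_relations : Option (List String)) (controls : List String), Dom_merge_control_relations_py existing_relations controls → Spec_merge_control_relations_py existing_relations controls (merge_control_relations_py existing_relations controls)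

-- ===== LEMMAS AND PROOFS =====

theorem contains_eq_decide {a : Type} [BEq a] [LawfulBEq a] (s : PySem.Set a) (x : a) :
    PySem.Set.contains s x = decide (x ∈ s) := by
  by_cases h : x ∈ s
  · rw [(PySem.Set.contains_iff s x).2 h]; simp [h]
  · have : ¬ PySem.Set.contains s x = true := fun hc => h ((PySem.Set.contains_iff s x).1 hc)
    rw [Bool.not_eq_true] at this
    rw [this]; simp [h]

-- A's loop, with `s` containing exactly the elements of `m`, produces
-- `m` followed by the first-occurrence dedup of the new tags filtered against `m`.
theorem merge_loop_eq (cs : List String) : ∀ (m : List String) (s : PySem.Set String),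
    (∀ x, PySem.Set.contains s x = decide (x ∈ m)) →
    (cs.foldl (fun (st : List String × PySem.Set String) control_acc =>
        let relation := "control:" ++ control_acc
        if PySem.Set.contains st.2 relation then st
        else (st.1 ++ [relation], PySem.Set.add st.2 relation)) (m, s)).1
      = m ++ (PySem.Set.ofList (cs.map (fun c => "control:" ++ c))).filter
               (fun t => !(decide (t ∈ m))) := by
  induction cs with
  | nil => intro m s h; simp [PySem.Set.ofList]
  | cons c cs ih =>
    intro m s h
    simp only [List.foldl_cons, List.map_cons, PySem.Set.ofList_cons]
    by_cases hm : ("control:" ++ c) ∈ m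
    · rw [h, decide_eq_true hm]
      simp only [if_true]
      rw [ih m s h]
      congr 1
      simp only [PySem.Set.discard, List.filter_filter, List.filter_cons]
      rw [show (!decide (("control:" ++ c) ∈ m)) = false by simp [hm]]
      simp only [Bool.false_eq_true, if_false]
      apply List.filter_congr
      intro y _
      by_cases hy : y ∈ m
      · simp [hy]
      · have : y ≠ "control:" ++ c := fun e => hy (e ▸ hm)
        simp [hy, this]
    · rw [h, decide_eq_false hm]
      simp only [Bool.false_eq_true, if_false]
      rw [ih (m ++ ["control:" ++ c]) (PySem.Set.add s ("control:" ++ c)) (by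
        intro x
        rw [contains_eq_decide]
        have hmem : x ∈ PySem.Set.add s ("control:" ++ c) ↔ x ∈ m ∨ x = "control:" ++ c := by
          rw [PySem.Set.mem_add]
          constructor
          · rintro (hx | hx)
            · left
              have := (PySem.Set.contains_iff s x).2 hx
              rw [h x] at this
              exact of_decide_eq_true this
            · right; exact hx
          · rintro (hx | hx)
            · left
              exact (PySem.Set.contains_iff s x).1 ((h x).trans (decide_eq_true hx))
            · right; exact hx
        simp [hmem, List.mem_append])]
      simp only [PySem.Set.discard, List.filter_filter, List.filter_cons]
      rw [show (!decide (("control:" ++ c) ∈ m)) = true by simp [hm]]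
      simp only [if_true, List.append_assoc, List.singleton_append]
      congr 2
      apply List.filter_congr
      intro y _
      by_cases hy : y ∈ m
      · simp [hy, List.mem_append]
      · by_cases hyc : y = "control:" ++ c
        · subst hyc; simp [List.mem_append]
        · simp [hy, hyc, List.mem_append]

-- first-occurrence dedup (Set.ofList) commutes with filtering
theorem ofList_filter (p : String → Bool) (l : List String) :
    PySem.Set.ofList (l.filter p) = (PySem.Set.ofList l).filter p := by
  induction l with
  | nil => simp [PySem.Set.ofList]
  | cons a l ih =>
    rw [PySem.Set.ofList_cons, List.filter_cons]
    by_cases hp : p a = true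
    · rw [if_pos hp, PySem.Set.ofList_cons, ih]
      simp only [PySem.Set.discard, List.filter_filter, List.filter_cons, hp, if_true]
      congr 1
      apply List.filter_congr
      intro y _; rw [Bool.and_comm]
    · rw [if_neg hp, ih]
      simp only [PySem.Set.discard, List.filter_filter, List.filter_cons, hp]
      simp only [Bool.false_eq_true, if_false]
      apply List.filter_congr
      intro y _
      by_cases hy : y = a
      · subst hy; simp [hp]
      · simp [hy]

-- B's worklist loop computes `fresh ++` the deduped new tags not already in `merged`.
theorem freshLoop_eq (n : Nat) : ∀ (cs : List String), cs.length ≤ n → ∀ (m fresh : List String),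
    freshLoop m cs fresh
      = fresh ++ (PySem.Set.ofList (cs.map (fun c => "control:" ++ c))).filter
                   (fun t => !(decide (t ∈ m))) := by
  induction n with
  | zero =>
    intro cs hlen m fresh
    have : cs = [] := List.eq_nil_of_length_eq_zero (Nat.le_zero.1 hlen)
    subst this; rw [freshLoop.eq_def]; simp [PySem.Set.ofList]
  | succ n ih =>
    intro cs hlen m fresh
    match cs with
    | [] => rw [freshLoop.eq_def]; simp [PySem.Set.ofList]
    | c :: rest =>
      rw [freshLoop.eq_def]
      simp only []
      have hrest : (rest.filter (fun x => !(x == c))).length ≤ n := by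
        have := List.length_filter_le (fun x => !(x == c)) rest
        simp at hlen; omega
      rw [ih _ hrest]
      -- the filtered worklist's tags are the deduped tail tags with `tag c` discarded
      have hmapfil : (rest.filter (fun x => !(x == c))).map (fun c => "control:" ++ c)
          = (rest.map (fun c => "control:" ++ c)).filter (fun t => !(t == ("control:" ++ c))) := by
        rw [List.filter_map]
        congr 1
        apply List.filter_congr
        intro y _
        simp only [Function.comp]
        by_cases hy : y = c
        · subst hy; simp
        · have : ¬ ("control:" ++ y = "control:" ++ c) :=
            fun e => hy ((String.append_right_inj _).mp e)
          simp [hy, this]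
      rw [hmapfil, ofList_filter]
      simp only [List.map_cons, PySem.Set.ofList_cons, List.filter_cons]
      by_cases hm : ("control:" ++ c) ∈ m
      · rw [if_pos hm]
        rw [show (!decide (("control:" ++ c) ∈ m)) = false by simp [hm]]
        simp only [Bool.false_eq_true, if_false, PySem.Set.discard]
      · rw [if_neg hm]
        rw [show (!decide (("control:" ++ c) ∈ m)) = true by simp [hm]]
        simp only [if_true, PySem.Set.discard, List.append_assoc, List.singleton_append]

-- ===== VERDICT (by name: the statement is the Claim_ definition above) =====
theorem merge_control_relations_py_spec : Claim_equal_merge_control_relations_py := by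
  intro er cs _
  unfold Spec_merge_control_relations_py merge_control_relations_py merge_control_relations_py_alt
  rw [merge_loop_eq cs (er.getD []) (PySem.Set.ofList (er.getD [])) (fun x => by
    rw [contains_eq_decide]
    simp [PySem.Set.mem_ofList])]
  show _ = er.getD [] ++ freshLoop (er.getD []) cs []
  rw [freshLoop_eq cs.length cs (Nat.le_refl _)]
  simp
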